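-- pv_equiv track=rewrite | github.com/ylinfy/leetcode | 2021/medium/jz0013/0409_movingCount.py | movingCount
-- ===== SOURCE A (Python) =====
-- def movingCount(m, n, k):
--     queue, visited = [(0, 0, 0, 0)], set()
--     while queue:
--         i, j, si, sj = queue.pop()
--         if i >= m or j >= n or k < si + sj or (i, j) in visited: continue
--         visited.add((i, j))
--         queue.append((i + 1, j, si + 1 if (i + 1) % 10 else si - 8, sj))  # 向下
--         queue.append((i, j + 1, si, sj + 1 if (j + 1) % 10 else sj - 8))  # 向右
--     return len(visited)
-- ===== SOURCE B (Python) =====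
-- def _ds(x):
--     # A's incremental "+1 / -8" update maintains exactly x // 10 + x % 10.
--     return x // 10 + x % 10
--
-- def movingCount(m, n, k):
--     # DP sweep in row-major order: a cell is reachable iff its digit-sum bound
--     # holds and it is the origin or its top/left neighbour is reachable.
--     # Any reachable index x has _ds(x) <= k, hence x <= 10*k + 9, so the sweep
--     # is clipped to the first min(m, 10*k+10) rows and min(n, 10*k+10) columns.
--     bound = 10 * k + 10
--     reach = set()
--     for i in range(min(m, bound)):
--         for j in range(min(n, bound)):
--             if _ds(i) + _ds(j) <= k and (
--                 (i == 0 and j == 0) or (i - 1, j) in reach or (i, j - 1) in reach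
--             ):
--                 reach.add((i, j))
--     return len(reach)
-- ===== Notes on version B (the rewrite author's own statement) =====
-- stated objective: simpler
-- what changed: Replaces the explicit-stack DFS with incremental digit-sum state by a row-major DP sweep that marks a cell reachable iff its digit-sum bound holds and its top or left neighbour (or the origin) is reachable, relying on down/right-only reachability being complete.
import Mathlib
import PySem

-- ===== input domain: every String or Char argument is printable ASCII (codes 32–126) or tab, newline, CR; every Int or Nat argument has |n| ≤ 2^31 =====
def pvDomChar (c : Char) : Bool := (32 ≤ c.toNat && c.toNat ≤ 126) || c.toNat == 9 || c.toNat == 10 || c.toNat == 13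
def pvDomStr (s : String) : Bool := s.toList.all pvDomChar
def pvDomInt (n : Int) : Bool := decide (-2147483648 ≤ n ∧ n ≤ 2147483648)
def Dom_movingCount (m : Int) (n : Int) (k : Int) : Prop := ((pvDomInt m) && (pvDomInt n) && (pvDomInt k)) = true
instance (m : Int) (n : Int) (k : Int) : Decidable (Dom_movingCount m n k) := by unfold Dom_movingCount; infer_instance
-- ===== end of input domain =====

-- B replaces A's explicit-stack DFS by a row-major DP sweep over the grid (same count, similar cost).


-- ===== PORT A =====
-- the while-loop of A, as fuel recursion (fuel is a totality guard only; the
-- supplied fuel is proved sufficient in the lemmas below)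
def movingCountLoop (m : Int) (n : Int) (k : Int) :
    Nat → List (Int × Int × Int × Int) → PySem.Set (Int × Int) → PySem.Set (Int × Int)
  | 0, _, visited => visited
  | fuel + 1, queue, visited =>
    match PySem.List.pop? queue with
    | none => visited                         -- while queue: exits
    | some ((i, j, si, sj), rest) =>
      if i ≥ m ∨ j ≥ n ∨ k < si + sj ∨ (i, j) ∈ visited then
        movingCountLoop m n k fuel rest visited
      else
        movingCountLoop m n k fuel
          (rest ++ [(i + 1, j, if PySem.Int.mod (i + 1) 10 ≠ 0 then si + 1 else si - 8, sj),
                    (i, j + 1, si, if PySem.Int.mod (j + 1) 10 ≠ 0 then sj + 1 else sj - 8)])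
          (PySem.Set.add visited (i, j))

def movingCount (m : Int) (n : Int) (k : Int) : Int :=
  PySem.Set.len (movingCountLoop m n k (1 + 2 * (m.toNat * n.toNat)) [(0, 0, 0, 0)] PySem.Set.empty)

-- ===== PORT B =====
def pvDs (x : Int) : Int := PySem.Int.floordiv x 10 + PySem.Int.mod x 10   -- Source B's _ds

def movingCount_alt (m : Int) (n : Int) (k : Int) : Int :=
  PySem.Set.len ((PySem.List.pyRange 0 (min m (10 * k + 10)) 1).foldl (fun reach i =>
    (PySem.List.pyRange 0 (min n (10 * k + 10)) 1).foldl (fun reach j =>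
      if pvDs i + pvDs j ≤ k ∧
          ((i = 0 ∧ j = 0) ∨ (i - 1, j) ∈ reach ∨ (i, j - 1) ∈ reach) then
        PySem.Set.add reach (i, j)
      else reach) reach) PySem.Set.empty)

-- ===== PRECONDITION & SPEC =====
def Spec_movingCount (m : Int) (n : Int) (k : Int) (out : Int) : Prop := out = movingCount_alt m n k
instance (m : Int) (n : Int) (k : Int) (out : Int) : Decidable (Spec_movingCount m n k out) := by unfold Spec_movingCount; infer_instance

-- ===== CLAIM (what is proved, stated in full; the proofs are below) =====
def Claim_equal_movingCount : Prop := ∀ (m : Int) (n : Int) (k : Int), Dom_movingCount m n k → Spec_movingCount m n k (movingCount m n k)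

-- ===== LEMMAS AND PROOFS =====

-- reachability by down/right moves through cells whose pseudo digit sum fits under k
inductive Reach (m n k : Int) : Int → Int → Prop where
  | origin : 0 < m → 0 < n → 0 ≤ k → Reach m n k 0 0
  | down {i j : Int} : Reach m n k i j → i + 1 < m → pvDs (i + 1) + pvDs j ≤ k → Reach m n k (i + 1) j
  | right {i j : Int} : Reach m n k i j → j + 1 < n → pvDs i + pvDs (j + 1) ≤ k → Reach m n k i (j + 1)

lemma pvDs_succ (i : Int) :
    pvDs (i + 1) = if PySem.Int.mod (i + 1) 10 ≠ 0 then pvDs i + 1 else pvDs i - 8 := by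
  unfold pvDs
  rw [PySem.Int.floordiv_eq_ediv_of_pos (by norm_num), PySem.Int.mod_eq_emod_of_pos (by norm_num),
      PySem.Int.floordiv_eq_ediv_of_pos (by norm_num), PySem.Int.mod_eq_emod_of_pos (by norm_num)]
  split_ifs with h <;> omega

lemma pvDs_bounds (x : Int) (hx : 0 ≤ x) : 0 ≤ pvDs x ∧ x ≤ 10 * pvDs x + 9 := by
  unfold pvDs
  rw [PySem.Int.floordiv_eq_ediv_of_pos (by norm_num), PySem.Int.mod_eq_emod_of_pos (by norm_num)]
  omega

lemma reach_region {m n k i j : Int} (h : Reach m n k i j) :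
    0 ≤ i ∧ i < m ∧ 0 ≤ j ∧ j < n ∧ pvDs i + pvDs j ≤ k := by
  induction h with
  | origin hm hn hk => have h0 : pvDs 0 = 0 := rfl; omega
  | down h hm hk ih => omega
  | right h hn hk ih => omega

lemma reach_iff (m n k i j : Int) :
    Reach m n k i j ↔
      (0 ≤ i ∧ i < m ∧ 0 ≤ j ∧ j < n ∧ pvDs i + pvDs j ≤ k) ∧
      ((i = 0 ∧ j = 0) ∨ Reach m n k (i - 1) j ∨ Reach m n k i (j - 1)) := by
  constructor
  · intro h
    refine ⟨reach_region h, ?_⟩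
    cases h with
    | origin hm hn hk => exact Or.inl ⟨rfl, rfl⟩
    | down h hm hk => exact Or.inr (Or.inl (by simpa using h))
    | right h hn hk => exact Or.inr (Or.inr (by simpa using h))
  · rintro ⟨⟨hi0, him, hj0, hjn, hsum⟩, hi | hr | hr⟩
    · obtain ⟨hi, hj⟩ := hi; subst hi; subst hj
      exact Reach.origin him hjn (by have h0 : pvDs 0 = 0 := rfl; omega)
    · have := Reach.down hr (by omega) (by rw [sub_add_cancel]; exact hsum)
      simpa [sub_add_cancel] using this
    · have := Reach.right hr (by omega) (by rw [sub_add_cancel]; exact hsum)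
      simpa [sub_add_cancel] using this

-- ---------- A side ----------

def qcells (queue : List (Int × Int × Int × Int)) : List (Int × Int) :=
  queue.map (fun t => (t.1, t.2.1))

def InvA (m n k : Int) (queue : List (Int × Int × Int × Int)) (visited : PySem.Set (Int × Int)) : Prop :=
  (∀ t ∈ queue, t.2.2.1 = pvDs t.1 ∧ t.2.2.2 = pvDs t.2.1 ∧
      ((t.1 = 0 ∧ t.2.1 = 0) ∨ Reach m n k (t.1 - 1) t.2.1 ∨ Reach m n k t.1 (t.2.1 - 1))) ∧
  (∀ p ∈ visited, Reach m n k p.1 p.2) ∧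
  (∀ p ∈ visited, ∀ q : Int × Int, (q = (p.1 + 1, p.2) ∨ q = (p.1, p.2 + 1)) →
      Reach m n k q.1 q.2 → q ∈ visited ∨ q ∈ qcells queue) ∧
  (Reach m n k 0 0 → ((0, 0) : Int × Int) ∈ visited ∨ ((0, 0) : Int × Int) ∈ qcells queue) ∧
  visited.Nodup

lemma closed_of_empty {m n k : Int} {visited : PySem.Set (Int × Int)}
    (h : InvA m n k [] visited) : ∀ i j, Reach m n k i j → (i, j) ∈ visited := by
  intro i j hr
  induction hr with
  | origin hm hn hk =>
    rcases h.2.2.2.1 (Reach.origin hm hn hk) with hv | hv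
    · exact hv
    · simp [qcells] at hv
  | down h' hm hk ih =>
    rcases h.2.2.1 _ ih _ (Or.inl rfl) (Reach.down h' hm hk) with hv | hv
    · exact hv
    · simp [qcells] at hv
  | right h' hn hk ih =>
    rcases h.2.2.1 _ ih _ (Or.inr rfl) (Reach.right h' hn hk) with hv | hv
    · exact hv
    · simp [qcells] at hv

noncomputable def gridF (m n : Int) : Finset (Int × Int) := Finset.Icc (0 : Int) (m - 1) ×ˢ Finset.Icc (0 : Int) (n - 1)

noncomputable def measureA (m n : Int) (queue : List (Int × Int × Int × Int)) (visited : List (Int × Int)) : Nat :=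
  queue.length + 2 * ((gridF m n) \ visited.toFinset).card

lemma loopA_spec (m n k : Int) : ∀ (fuel : Nat) (queue : List (Int × Int × Int × Int))
    (visited : PySem.Set (Int × Int)), InvA m n k queue visited →
    measureA m n queue visited ≤ fuel →
    (movingCountLoop m n k fuel queue visited).Nodup ∧
      (∀ p : Int × Int, p ∈ movingCountLoop m n k fuel queue visited ↔ Reach m n k p.1 p.2 ∨ p ∈ visited) := by
  intro fuel
  induction fuel with
  | zero =>
    intro queue visited hInv hfuel
    have hq : queue = [] := by
      cases queue with
      | nil => rfl
      | cons a t => exfalso; simp [measureA] at hfuel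
    subst hq
    refine ⟨hInv.2.2.2.2, fun p => ⟨fun hp => Or.inr hp, ?_⟩⟩
    rintro (hr | hp)
    · have := closed_of_empty hInv p.1 p.2 hr; simpa using this
    · exact hp
  | succ f ih =>
    intro queue visited hInv hfuel
    rcases List.eq_nil_or_concat queue with hq | ⟨rest, t, hq⟩
    · subst hq
      have hstep : movingCountLoop m n k (f + 1) [] visited = visited := by
        simp [movingCountLoop, PySem.List.pop?]
      rw [hstep]
      refine ⟨hInv.2.2.2.2, fun p => ⟨fun hp => Or.inr hp, ?_⟩⟩
      rintro (hr | hp)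
      · have := closed_of_empty hInv p.1 p.2 hr; simpa using this
      · exact hp
    · rw [List.concat_eq_append] at hq
      subst hq
      obtain ⟨i, j, si, sj⟩ := t
      obtain ⟨hsi, hsj, hdisj⟩ := hInv.1 (i, j, si, sj) (by simp)
      dsimp only at hsi hsj hdisj
      by_cases hc : i ≥ m ∨ j ≥ n ∨ k < si + sj ∨ (i, j) ∈ visited
      · -- skipped entry
        have hstep : movingCountLoop m n k (f + 1) (rest ++ [(i, j, si, sj)]) visited
            = movingCountLoop m n k f rest visited := by
          simp only [movingCountLoop, PySem.List.pop?_last]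
          rw [if_pos hc]
        rw [hstep]
        refine ih rest visited ⟨?_, hInv.2.1, ?_, ?_, hInv.2.2.2.2⟩ ?_
        · exact fun t ht => hInv.1 t (by simp [ht])
        · intro p hp q hq hrq
          rcases hInv.2.2.1 p hp q hq hrq with h | h
          · exact Or.inl h
          · simp only [qcells, List.map_append, List.mem_append, List.map_cons, List.map_nil,
              List.mem_cons, List.not_mem_nil, or_false] at h
            rcases h with h | h
            · exact Or.inr (by simpa [qcells] using h)
            · subst h
              have hr := reach_region hrq
              simp only at hr
              rcases hc with h1 | h1 | h1 | h1
              · omega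
              · omega
              · exfalso; rw [hsi, hsj] at h1; omega
              · exact Or.inl h1
        · intro h00
          rcases hInv.2.2.2.1 h00 with h | h
          · exact Or.inl h
          · simp only [qcells, List.map_append, List.mem_append, List.map_cons, List.map_nil,
              List.mem_cons, List.not_mem_nil, or_false] at h
            rcases h with h | h
            · exact Or.inr (by simpa [qcells] using h)
            · have hij : i = 0 ∧ j = 0 := by
                have := h.symm
                exact ⟨congrArg Prod.fst this, congrArg Prod.snd this⟩
              obtain ⟨hi0, hj0⟩ := hij; subst hi0; subst hj0
              have hr := reach_region h00
              rcases hc with h1 | h1 | h1 | h1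
              · omega
              · omega
              · exfalso; rw [hsi, hsj] at h1; omega
              · exact Or.inl (by simpa using h1)
        · have hlen : (rest ++ [(i, j, si, sj)]).length = rest.length + 1 := by
            simp
          simp only [measureA, hlen] at hfuel ⊢
          omega
      · -- visit entry
        push_neg at hc
        obtain ⟨h1, h2, h3, h4⟩ := hc
        have hreach : Reach m n k i j := by
          rcases hdisj with ⟨hi0, hj0⟩ | hr | hr
          · subst hi0; subst hj0
            refine Reach.origin (by omega) (by omega) ?_
            have h0 : pvDs 0 = 0 := rfl
            rw [hsi, hsj] at h3; omega
          · have := Reach.down hr (by omega) (by rw [sub_add_cancel, ← hsi, ← hsj]; omega)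
            simpa [sub_add_cancel] using this
          · have := Reach.right hr (by omega) (by rw [sub_add_cancel, ← hsi, ← hsj]; omega)
            simpa [sub_add_cancel] using this
        have hvadd : PySem.Set.add visited (i, j) = visited ++ [(i, j)] := by
          rw [PySem.Set.add, if_neg]
          simpa [PySem.Set.contains] using h4
        have hstep : movingCountLoop m n k (f + 1) (rest ++ [(i, j, si, sj)]) visited
            = movingCountLoop m n k f
              (rest ++ [(i + 1, j, if PySem.Int.mod (i + 1) 10 ≠ 0 then si + 1 else si - 8, sj),
                        (i, j + 1, si, if PySem.Int.mod (j + 1) 10 ≠ 0 then sj + 1 else sj - 8)])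
              (PySem.Set.add visited (i, j)) := by
          simp only [movingCountLoop, PySem.List.pop?_last]
          rw [if_neg (by push_neg; exact ⟨h1, h2, h3, h4⟩)]
        rw [hstep]
        have hInv' : InvA m n k
            (rest ++ [(i + 1, j, if PySem.Int.mod (i + 1) 10 ≠ 0 then si + 1 else si - 8, sj),
                      (i, j + 1, si, if PySem.Int.mod (j + 1) 10 ≠ 0 then sj + 1 else sj - 8)])
            (PySem.Set.add visited (i, j)) := by
          refine ⟨?_, ?_, ?_, ?_, PySem.Set.nodup_add visited (i, j) hInv.2.2.2.2⟩
          · intro t ht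
            rcases List.mem_append.mp ht with h | h
            · exact hInv.1 t (by simp [h])
            · rcases List.mem_cons.mp h with h | h
              · subst h
                refine ⟨by rw [hsi, pvDs_succ], hsj, Or.inr (Or.inl ?_)⟩
                simpa [add_sub_cancel_right] using hreach
              · rcases List.mem_cons.mp h with h | h
                · subst h
                  refine ⟨hsi, by rw [hsj, pvDs_succ], Or.inr (Or.inr ?_)⟩
                  simpa [add_sub_cancel_right] using hreach
                · simp at h
          · intro p hp
            rcases (PySem.Set.mem_add visited (i, j) p).mp hp with h | h
            · exact hInv.2.1 p h
            · subst h; exact hreach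
          · intro p hp q hq hrq
            rcases (PySem.Set.mem_add visited (i, j) p).mp hp with hpv | hpv
            · rcases hInv.2.2.1 p hpv q hq hrq with h | h
              · exact Or.inl ((PySem.Set.mem_add visited (i, j) q).mpr (Or.inl h))
              · simp only [qcells, List.map_append, List.mem_append, List.map_cons, List.map_nil,
                  List.mem_cons, List.not_mem_nil, or_false] at h
                rcases h with h | h
                · exact Or.inr (by
                    simp only [qcells, List.map_append, List.mem_append]
                    exact Or.inl h)
                · exact Or.inl ((PySem.Set.mem_add visited (i, j) q).mpr (Or.inr h))
            · subst hpv
              rcases hq with h | h <;> (subst h; exact Or.inr (by simp [qcells]))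
          · intro h00
            rcases hInv.2.2.2.1 h00 with h | h
            · exact Or.inl ((PySem.Set.mem_add visited (i, j) _).mpr (Or.inl h))
            · simp only [qcells, List.map_append, List.mem_append, List.map_cons, List.map_nil,
                List.mem_cons, List.not_mem_nil, or_false] at h
              rcases h with h | h
              · exact Or.inr (by
                  simp only [qcells, List.map_append, List.mem_append]
                  exact Or.inl h)
              · exact Or.inl ((PySem.Set.mem_add visited (i, j) _).mpr (Or.inr h))
        have hmeas : measureA m n
            (rest ++ [(i + 1, j, if PySem.Int.mod (i + 1) 10 ≠ 0 then si + 1 else si - 8, sj),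
                      (i, j + 1, si, if PySem.Int.mod (j + 1) 10 ≠ 0 then sj + 1 else sj - 8)])
            (PySem.Set.add visited (i, j)) ≤ f := by
          have hr := reach_region hreach
          have hmem_grid : ((i, j) : Int × Int) ∈ gridF m n := by
            simp only [gridF, Finset.mem_product, Finset.mem_Icc]
            omega
          have hnotin : ((i, j) : Int × Int) ∉ visited.toFinset := by simpa using h4
          have h1f : (visited ++ [(i, j)]).toFinset = insert ((i, j) : Int × Int) visited.toFinset := by
            ext x
            simp
          have hcard : ((gridF m n) \ (visited ++ [(i, j)]).toFinset).card + 1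
              = ((gridF m n) \ visited.toFinset).card := by
            rw [h1f, Finset.sdiff_insert, Finset.card_erase_of_mem (Finset.mem_sdiff.mpr ⟨hmem_grid, hnotin⟩)]
            have hpos : 0 < ((gridF m n) \ visited.toFinset).card :=
              Finset.card_pos.mpr ⟨(i, j), Finset.mem_sdiff.mpr ⟨hmem_grid, hnotin⟩⟩
            omega
          rw [hvadd]
          simp only [measureA, List.length_append, List.length_cons, List.length_nil] at hfuel ⊢
          omega
        obtain ⟨hnd, hmem⟩ := ih _ _ hInv' hmeas
        refine ⟨hnd, fun p => ?_⟩
        rw [hmem p]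
        rw [PySem.Set.mem_add]
        constructor
        · rintro (hr | hp | hp)
          · exact Or.inl hr
          · exact Or.inr hp
          · subst hp; exact Or.inl hreach
        · rintro (hr | hp)
          · exact Or.inl hr
          · exact Or.inr (Or.inl hp)

lemma A_members (m n k : Int) :
    (movingCountLoop m n k (1 + 2 * (m.toNat * n.toNat)) [(0, 0, 0, 0)] PySem.Set.empty).Nodup ∧
      (∀ p : Int × Int, p ∈ movingCountLoop m n k (1 + 2 * (m.toNat * n.toNat)) [(0, 0, 0, 0)] PySem.Set.empty ↔
        Reach m n k p.1 p.2) := by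
  have hcard : (gridF m n).card = m.toNat * n.toNat := by
    rw [gridF, Finset.card_product, Int.card_Icc, Int.card_Icc,
        show m - 1 + 1 - 0 = m by ring, show n - 1 + 1 - 0 = n by ring]
  have hInv0 : InvA m n k [(0, 0, 0, 0)] PySem.Set.empty := by
    refine ⟨?_, ?_, ?_, ?_, List.nodup_nil⟩
    · intro t ht
      simp only [List.mem_cons, List.not_mem_nil, or_false] at ht
      subst ht
      exact ⟨rfl, rfl, Or.inl ⟨rfl, rfl⟩⟩
    · intro p hp; simp [PySem.Set.empty] at hp
    · intro p hp; simp [PySem.Set.empty] at hp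
    · intro _; exact Or.inr (by simp [qcells])
  have hmeas : measureA m n [(0, 0, 0, 0)] PySem.Set.empty ≤ 1 + 2 * (m.toNat * n.toNat) := by
    simp only [measureA, List.length_cons, List.length_nil, PySem.Set.empty,
      List.toFinset_nil, Finset.sdiff_empty, hcard]
    omega
  obtain ⟨hnd, hmem⟩ := loopA_spec m n k (1 + 2 * (m.toNat * n.toNat)) [(0, 0, 0, 0)] PySem.Set.empty hInv0 hmeas
  refine ⟨hnd, fun p => ?_⟩
  rw [hmem p]
  simp [PySem.Set.empty]

-- ---------- B side ----------

lemma innerB (m n k i : Int) (hi0 : 0 ≤ i) (him : i < m) :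
    ∀ (c : Nat), (c : Int) ≤ n → ∀ reach : PySem.Set (Int × Int),
    reach.Nodup → (∀ p : Int × Int, p ∈ reach ↔ Reach m n k p.1 p.2 ∧ p.1 < i) →
    ((PySem.List.pyRange 0 (c : Int) 1).foldl (fun reach j =>
        if pvDs i + pvDs j ≤ k ∧
            ((i = 0 ∧ j = 0) ∨ (i - 1, j) ∈ reach ∨ (i, j - 1) ∈ reach) then
          PySem.Set.add reach (i, j)
        else reach) reach).Nodup ∧
    (∀ p : Int × Int, p ∈ (PySem.List.pyRange 0 (c : Int) 1).foldl (fun reach j =>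
        if pvDs i + pvDs j ≤ k ∧
            ((i = 0 ∧ j = 0) ∨ (i - 1, j) ∈ reach ∨ (i, j - 1) ∈ reach) then
          PySem.Set.add reach (i, j)
        else reach) reach ↔ Reach m n k p.1 p.2 ∧ (p.1 < i ∨ (p.1 = i ∧ p.2 < (c : Int)))) := by
  intro c
  induction c with
  | zero =>
    intro _ reach hnd hchar
    rw [PySem.List.pyRange_one_eq_nil (by norm_num)]
    simp only [List.foldl_nil]
    refine ⟨hnd, fun p => ?_⟩
    rw [hchar p]
    constructor
    · rintro ⟨hr, h⟩; exact ⟨hr, Or.inl h⟩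
    · rintro ⟨hr, h | ⟨h1, h2⟩⟩
      · exact ⟨hr, h⟩
      · have := reach_region hr; omega
  | succ c ih =>
    intro hcn reach hnd hchar
    have hc1 : ((c + 1 : Nat) : Int) = (c : Int) + 1 := by push_cast; ring
    rw [hc1] at hcn ⊢
    rw [PySem.List.pyRange_one_succ_right (by positivity), List.foldl_append]
    obtain ⟨hnd', hchar'⟩ := ih (by omega) reach hnd hchar
    set r' := (PySem.List.pyRange 0 (c : Int) 1).foldl (fun reach j =>
        if pvDs i + pvDs j ≤ k ∧
            ((i = 0 ∧ j = 0) ∨ (i - 1, j) ∈ reach ∨ (i, j - 1) ∈ reach) then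
          PySem.Set.add reach (i, j)
        else reach) reach with hr'def
    simp only [List.foldl_cons, List.foldl_nil]
    have hcond_iff : (pvDs i + pvDs (c : Int) ≤ k ∧
        ((i = 0 ∧ (c : Int) = 0) ∨ (i - 1, (c : Int)) ∈ r' ∨ (i, (c : Int) - 1) ∈ r')) ↔
        Reach m n k i (c : Int) := by
      constructor
      · rintro ⟨hsum, hd⟩
        refine (reach_iff m n k i (c : Int)).mpr ⟨⟨hi0, him, by positivity, by omega, hsum⟩, ?_⟩
        rcases hd with h | h | h
        · exact Or.inl h
        · exact Or.inr (Or.inl ((hchar' _).mp h).1)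
        · exact Or.inr (Or.inr ((hchar' _).mp h).1)
      · intro hr
        obtain ⟨⟨_, _, _, _, hsum⟩, hd⟩ := (reach_iff m n k i (c : Int)).mp hr
        refine ⟨hsum, ?_⟩
        rcases hd with h | h | h
        · exact Or.inl h
        · exact Or.inr (Or.inl ((hchar' _).mpr ⟨h, Or.inl (by omega)⟩))
        · exact Or.inr (Or.inr ((hchar' _).mpr ⟨h, Or.inr ⟨rfl, by omega⟩⟩))
    by_cases hcond : pvDs i + pvDs (c : Int) ≤ k ∧
        ((i = 0 ∧ (c : Int) = 0) ∨ (i - 1, (c : Int)) ∈ r' ∨ (i, (c : Int) - 1) ∈ r')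
    · have hr : Reach m n k i (c : Int) := hcond_iff.mp hcond
      rw [if_pos hcond]
      refine ⟨PySem.Set.nodup_add r' _ hnd', fun p => ?_⟩
      rw [PySem.Set.mem_add, hchar' p]
      constructor
      · rintro (⟨hRp, hrange⟩ | hp)
        · exact ⟨hRp, by omega⟩
        · subst hp; exact ⟨hr, Or.inr ⟨rfl, by omega⟩⟩
      · rintro ⟨hRp, hrange⟩
        by_cases hp : p = (i, (c : Int))
        · exact Or.inr hp
        · have hne : ¬(p.1 = i ∧ p.2 = (c : Int)) := by
            intro hq; exact hp (Prod.ext_iff.mpr hq)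
          exact Or.inl ⟨hRp, by omega⟩
    · have hr : ¬ Reach m n k i (c : Int) := fun h => hcond (hcond_iff.mpr h)
      rw [if_neg hcond]
      refine ⟨hnd', fun p => ?_⟩
      rw [hchar' p]
      constructor
      · rintro ⟨hRp, hrange⟩; exact ⟨hRp, by omega⟩
      · rintro ⟨hRp, hrange⟩
        refine ⟨hRp, ?_⟩
        by_cases hp : p = (i, (c : Int))
        · subst hp; exact absurd hRp hr
        · have hne : ¬(p.1 = i ∧ p.2 = (c : Int)) := by
            intro hq; exact hp (Prod.ext_iff.mpr hq)
          omega

lemma rowB (m n k i : Int) (hi0 : 0 ≤ i) (him : i < m) (reach : PySem.Set (Int × Int))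
    (hnd : reach.Nodup) (hchar : ∀ p : Int × Int, p ∈ reach ↔ Reach m n k p.1 p.2 ∧ p.1 < i) :
    ((PySem.List.pyRange 0 (min n (10 * k + 10)) 1).foldl (fun reach j =>
        if pvDs i + pvDs j ≤ k ∧
            ((i = 0 ∧ j = 0) ∨ (i - 1, j) ∈ reach ∨ (i, j - 1) ∈ reach) then
          PySem.Set.add reach (i, j)
        else reach) reach).Nodup ∧
    (∀ p : Int × Int, p ∈ (PySem.List.pyRange 0 (min n (10 * k + 10)) 1).foldl (fun reach j =>
        if pvDs i + pvDs j ≤ k ∧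
            ((i = 0 ∧ j = 0) ∨ (i - 1, j) ∈ reach ∨ (i, j - 1) ∈ reach) then
          PySem.Set.add reach (i, j)
        else reach) reach ↔ Reach m n k p.1 p.2 ∧ p.1 < i + 1) := by
  by_cases hn : 0 < min n (10 * k + 10)
  · have hcast : (((min n (10 * k + 10)).toNat : Nat) : Int) = min n (10 * k + 10) :=
      Int.toNat_of_nonneg (by omega)
    obtain ⟨hnd', hchar'⟩ := innerB m n k i hi0 him (min n (10 * k + 10)).toNat
      (by omega) reach hnd hchar
    rw [hcast] at hnd' hchar'
    refine ⟨hnd', fun p => ?_⟩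
    rw [hchar' p]
    constructor
    · rintro ⟨hRp, hrange⟩; exact ⟨hRp, by omega⟩
    · rintro ⟨hRp, hrange⟩
      have hr := reach_region hRp
      have hb2 := pvDs_bounds p.2 (by omega)
      have hb1 := pvDs_bounds p.1 (by omega)
      exact ⟨hRp, by omega⟩
  · rw [PySem.List.pyRange_one_eq_nil (by omega)]
    simp only [List.foldl_nil]
    refine ⟨hnd, fun p => ?_⟩
    rw [hchar p]
    constructor
    · rintro ⟨hRp, hrange⟩; exact ⟨hRp, by omega⟩
    · rintro ⟨hRp, _⟩
      have hr := reach_region hRp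
      have hb2 := pvDs_bounds p.2 (by omega)
      have hb1 := pvDs_bounds p.1 (by omega)
      omega

lemma B_members (m n k : Int) :
    ((PySem.List.pyRange 0 (min m (10 * k + 10)) 1).foldl (fun reach i =>
      (PySem.List.pyRange 0 (min n (10 * k + 10)) 1).foldl (fun reach j =>
        if pvDs i + pvDs j ≤ k ∧
            ((i = 0 ∧ j = 0) ∨ (i - 1, j) ∈ reach ∨ (i, j - 1) ∈ reach) then
          PySem.Set.add reach (i, j)
        else reach) reach) PySem.Set.empty).Nodup ∧
    (∀ p : Int × Int, p ∈ (PySem.List.pyRange 0 (min m (10 * k + 10)) 1).foldl (fun reach i =>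
      (PySem.List.pyRange 0 (min n (10 * k + 10)) 1).foldl (fun reach j =>
        if pvDs i + pvDs j ≤ k ∧
            ((i = 0 ∧ j = 0) ∨ (i - 1, j) ∈ reach ∨ (i, j - 1) ∈ reach) then
          PySem.Set.add reach (i, j)
        else reach) reach) PySem.Set.empty ↔ Reach m n k p.1 p.2) := by
  have outer : ∀ (r : Nat), (r : Int) ≤ min m (10 * k + 10) →
      ((PySem.List.pyRange 0 (r : Int) 1).foldl (fun reach i =>
        (PySem.List.pyRange 0 (min n (10 * k + 10)) 1).foldl (fun reach j =>
          if pvDs i + pvDs j ≤ k ∧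
              ((i = 0 ∧ j = 0) ∨ (i - 1, j) ∈ reach ∨ (i, j - 1) ∈ reach) then
            PySem.Set.add reach (i, j)
          else reach) reach) PySem.Set.empty).Nodup ∧
      (∀ p : Int × Int, p ∈ (PySem.List.pyRange 0 (r : Int) 1).foldl (fun reach i =>
        (PySem.List.pyRange 0 (min n (10 * k + 10)) 1).foldl (fun reach j =>
          if pvDs i + pvDs j ≤ k ∧
              ((i = 0 ∧ j = 0) ∨ (i - 1, j) ∈ reach ∨ (i, j - 1) ∈ reach) then
            PySem.Set.add reach (i, j)
          else reach) reach) PySem.Set.empty ↔ Reach m n k p.1 p.2 ∧ p.1 < (r : Int)) := by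
    intro r
    induction r with
    | zero =>
      intro _
      rw [PySem.List.pyRange_one_eq_nil (a := 0) (b := ((0 : Nat) : Int)) (by norm_num)]
      simp only [List.foldl_nil]
      refine ⟨List.nodup_nil, fun p => ?_⟩
      simp only [PySem.Set.empty, List.not_mem_nil, false_iff]
      rintro ⟨hRp, h⟩
      have := reach_region hRp; omega
    | succ r ih =>
      intro hrm
      have hr1 : ((r + 1 : Nat) : Int) = (r : Int) + 1 := by push_cast; ring
      rw [hr1] at hrm ⊢
      rw [PySem.List.pyRange_one_succ_right (by positivity), List.foldl_append]
      obtain ⟨hnd', hchar'⟩ := ih (by omega)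
      simp only [List.foldl_cons, List.foldl_nil]
      exact rowB m n k (r : Int) (by positivity) (by omega) _ hnd' hchar'
  by_cases hm : 0 < min m (10 * k + 10)
  · have hcast : (((min m (10 * k + 10)).toNat : Nat) : Int) = min m (10 * k + 10) :=
      Int.toNat_of_nonneg (by omega)
    obtain ⟨hnd', hchar'⟩ := outer (min m (10 * k + 10)).toNat (by omega)
    rw [hcast] at hnd' hchar'
    refine ⟨hnd', fun p => ?_⟩
    rw [hchar' p]
    constructor
    · rintro ⟨hRp, _⟩; exact hRp
    · intro hRp
      have hr := reach_region hRp
      have hb2 := pvDs_bounds p.2 (by omega)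
      have hb1 := pvDs_bounds p.1 (by omega)
      exact ⟨hRp, by omega⟩
  · rw [PySem.List.pyRange_one_eq_nil (a := 0) (b := min m (10 * k + 10)) (by omega)]
    simp only [List.foldl_nil]
    refine ⟨List.nodup_nil, fun p => ?_⟩
    simp only [PySem.Set.empty, List.not_mem_nil, false_iff]
    intro hRp
    have hr := reach_region hRp
    have hb2 := pvDs_bounds p.2 (by omega)
    have hb1 := pvDs_bounds p.1 (by omega)
    omega

-- ===== VERDICT (by name: the statement is the Claim_ definition above) =====
theorem movingCount_spec : Claim_equal_movingCount := by
  intro m n k _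
  unfold Spec_movingCount movingCount movingCount_alt
  obtain ⟨hAnd, hA⟩ := A_members m n k
  obtain ⟨hBnd, hB⟩ := B_members m n k
  have hperm := (List.perm_ext_iff_of_nodup hAnd hBnd).mpr (fun p => by rw [hA p, hB p])
  simp only [PySem.Set.len]
  rw [hperm.length_eq]
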